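-- pv_equiv track=rewrite | github.com/yjcyxky/research-hub-mcp | text2table/prompts.py | format_entities_with_relations
-- ===== SOURCE A (Python) =====
-- from typing import List, Optional
--
-- def format_entities_with_relations(
--     entities: List[dict],
--     labels: List[str],
--     use_gliner: bool = True,
-- ) -> str:
--     """
--     Format extracted entities with explicit relationship hints.
--
--     This format helps the model understand that multiple combinations
--     of entities should result in multiple rows.
--
--     Args:
--         entities: List of entity dictionaries.
--         labels: List of expected labels.
--         use_gliner: Whether GLiNER extraction is enabled.
--
--     Returns:
--         Formatted string with relationship hints.
--     """
--     if not use_gliner: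
--         return "- Entity extraction disabled; infer entities directly from the source text."
--
--     if not entities:
--         return "- No entities were found with the current threshold."
--
--     # Group entities by label
--     grouped: dict[str, List[str]] = {label: [] for label in labels}
--     for entity in entities:
--         label = str(entity.get("label", "")).strip()
--         text = str(entity.get("text", "")).strip()
--         if not label or not text:
--             continue
--         if label not in grouped:
--             grouped[label] = []
--         if text not in grouped[label]:
--             grouped[label].append(text)
--
--     lines: List[str] = []
--     for label in labels:
--         values = grouped.get(label, [])
--         if values:
--             # List each value separately to emphasize they are distinct
--             for v in values:
--                 lines.append(f"- {label}: {v}")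
--         else:
--             lines.append(f"- {label}: N/A")
--
--     # Add explicit count hint for multi-entity cases
--     entity_counts = [(label, len(grouped.get(label, []))) for label in labels]
--     multi_counts = [(l, c) for l, c in entity_counts if c > 1]
--
--     if multi_counts:
--         count_info = ", ".join([f"{c} {l}(s)" for l, c in multi_counts])
--         lines.append(f"\nNote: Found {count_info}. Generate a separate row for each combination.")
--
--     return "\n".join(lines)
-- ===== SOURCE B (Python) =====
-- from typing import List
--
-- def format_entities_with_relations(
--     entities: List[dict],
--     labels: List[str],
--     use_gliner: bool = True,
-- ) -> str:
--     """Dict-free re-implementation: per-label scan of entities instead of a grouped index."""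
--     if not use_gliner:
--         return "- Entity extraction disabled; infer entities directly from the source text."
--     if not entities:
--         return "- No entities were found with the current threshold."
--
--     def values_for(label: str) -> List[str]:
--         vs: List[str] = []
--         for e in entities:
--             l = str(e.get("label", "")).strip()
--             t = str(e.get("text", "")).strip()
--             if l and t and l == label and t not in vs:
--                 vs.append(t)
--         return vs
--
--     per_label = [(label, values_for(label)) for label in labels]
--
--     lines: List[str] = []
--     for label, vs in per_label:
--         if vs:
--             lines.extend(f"- {label}: {v}" for v in vs)
--         else:
--             lines.append(f"- {label}: N/A")
--
--     multi = [(l, len(vs)) for l, vs in per_label if len(vs) > 1]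
--     if multi:
--         info = ", ".join(f"{c} {l}(s)" for l, c in multi)
--         lines.append(f"\nNote: Found {info}. Generate a separate row for each combination.")
--
--     return "\n".join(lines)
-- ===== Notes on version B (the rewrite author's own statement) =====
-- stated objective: alternative
-- what changed: Replaces A's mutable grouped-by-label dict (built in one pass over entities, then read back per label) with a dict-free per-label rescan of the entity list that dedups into a local list, pairing each label with its values once and deriving lines and the multi-count note from those pairs.
import Mathlib
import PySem

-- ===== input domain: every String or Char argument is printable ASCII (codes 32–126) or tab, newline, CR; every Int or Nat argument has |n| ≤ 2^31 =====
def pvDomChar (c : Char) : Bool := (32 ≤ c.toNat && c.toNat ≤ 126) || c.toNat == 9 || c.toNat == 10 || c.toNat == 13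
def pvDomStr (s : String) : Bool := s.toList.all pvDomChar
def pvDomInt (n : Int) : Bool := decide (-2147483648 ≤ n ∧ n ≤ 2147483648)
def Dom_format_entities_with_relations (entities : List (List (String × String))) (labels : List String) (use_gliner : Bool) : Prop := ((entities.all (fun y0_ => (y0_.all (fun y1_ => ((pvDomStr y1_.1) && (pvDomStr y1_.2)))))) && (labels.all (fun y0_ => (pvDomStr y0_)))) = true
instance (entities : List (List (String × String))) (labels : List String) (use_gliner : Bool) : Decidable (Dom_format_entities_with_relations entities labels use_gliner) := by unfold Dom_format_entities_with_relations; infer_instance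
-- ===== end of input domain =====

-- B drops A's grouped-by-label dict: it rescans the entity list per label, deduping into a
-- local list; same output, different decomposition (no index structure). Equivalence proved total.


-- ===== PORT A =====
-- entity.get(k, "") on an association list (first match, Python dict lookup); shared by both ports
def pyGetAssocD (e : List (String × String)) (k dflt : String) : String :=
  match e.find? (fun p => p.1 == k) with
  | some p => p.2
  | none => dflt

-- f"- {label}: {v}" ; shared by both ports
def pvFmtLine (label v : String) : String := "- " ++ label ++ ": " ++ v

-- f"\nNote: Found {info}. Generate a separate row for each combination."
def pvNote (info : String) : String :=
  "\nNote: Found " ++ info ++ ". Generate a separate row for each combination."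

-- one iteration of A's `for entity in entities` grouping loop
def pvStepA (d : PySem.Dict String (List String)) (e : List (String × String)) :
    PySem.Dict String (List String) :=
  let label := PySem.Str.strip (pyGetAssocD e "label" "")
  let text := PySem.Str.strip (pyGetAssocD e "text" "")
  if label = "" ∨ text = "" then d
  else
    let d := if d.contains label then d else d.insert label []
    if text ∈ d.getD label [] then d else d.insert label (d.getD label [] ++ [text])

def format_entities_with_relations (entities : List (List (String × String))) (labels : List String) (use_gliner : Bool) : String :=
  if use_gliner = false then
    "- Entity extraction disabled; infer entities directly from the source text."
  else if entities = [] then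
    "- No entities were found with the current threshold."
  else
    let grouped0 : PySem.Dict String (List String) :=
      labels.foldl (fun d label => d.insert label []) PySem.Dict.empty
    let grouped := entities.foldl pvStepA grouped0
    let lines : List String := labels.foldl (fun lines label =>
      let values := grouped.getD label []
      if values ≠ [] then
        values.foldl (fun lines v => lines ++ [pvFmtLine label v]) lines
      else
        lines ++ [pvFmtLine label "N/A"]) []
    let entity_counts : List (String × Nat) :=
      labels.map (fun label => (label, (grouped.getD label []).length))
    let multi_counts := entity_counts.filter (fun p => p.2 > 1)
    let lines := if multi_counts ≠ [] then
        lines ++ [pvNote (PySem.Str.join ", "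
          (multi_counts.map (fun p => PySem.Int.toStr (p.2 : Int) ++ " " ++ p.1 ++ "(s)")))]
      else lines
    PySem.Str.join "\n" lines

-- ===== PORT B =====
-- values_for(label): dedup (first-seen order) of the stripped texts of entities whose
-- stripped label equals `label` (both non-empty)
def pvValuesFor (entities : List (List (String × String))) (label : String) : List String :=
  entities.foldl (fun vs e =>
    let l := PySem.Str.strip (pyGetAssocD e "label" "")
    let t := PySem.Str.strip (pyGetAssocD e "text" "")
    if l ≠ "" ∧ t ≠ "" ∧ l = label ∧ t ∉ vs then vs ++ [t] else vs) []

def format_entities_with_relations_alt (entities : List (List (String × String))) (labels : List String) (use_gliner : Bool) : String :=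
  if use_gliner = false then
    "- Entity extraction disabled; infer entities directly from the source text."
  else if entities = [] then
    "- No entities were found with the current threshold."
  else
    let per_label : List (String × List String) :=
      labels.map (fun label => (label, pvValuesFor entities label))
    let lines : List String := per_label.foldl (fun lines p =>
      if p.2 ≠ [] then lines ++ p.2.map (pvFmtLine p.1)
      else lines ++ [pvFmtLine p.1 "N/A"]) []
    let multi := (per_label.filter (fun p => p.2.length > 1)).map (fun p => (p.1, p.2.length))
    let lines := if multi ≠ [] then
        lines ++ [pvNote (PySem.Str.join ", "
          (multi.map (fun p => PySem.Int.toStr (p.2 : Int) ++ " " ++ p.1 ++ "(s)")))]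
      else lines
    PySem.Str.join "\n" lines

-- ===== PRECONDITION & SPEC =====
def Spec_format_entities_with_relations (entities : List (List (String × String))) (labels : List String) (use_gliner : Bool) (out : String) : Prop := out = format_entities_with_relations_alt entities labels use_gliner
instance (entities : List (List (String × String))) (labels : List String) (use_gliner : Bool) (out : String) : Decidable (Spec_format_entities_with_relations entities labels use_gliner out) := by unfold Spec_format_entities_with_relations; infer_instance

-- ===== CLAIM (what is proved, stated in full; the proofs are below) =====
def Claim_equal_format_entities_with_relations : Prop := ∀ (entities : List (List (String × String))) (labels : List String) (use_gliner : Bool), Dom_format_entities_with_relations entities labels use_gliner → Spec_format_entities_with_relations entities labels use_gliner (format_entities_with_relations entities labels use_gliner)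

-- ===== LEMMAS AND PROOFS =====

-- A's grouping step changes `getD · l []` exactly as B's dedup step does
lemma getD_pvStepA (d : PySem.Dict String (List String)) (e : List (String × String)) (l : String) :
    (pvStepA d e).getD l [] =
      (let lab := PySem.Str.strip (pyGetAssocD e "label" "")
       let t := PySem.Str.strip (pyGetAssocD e "text" "")
       if lab ≠ "" ∧ t ≠ "" ∧ lab = l ∧ t ∉ d.getD l [] then d.getD l [] ++ [t] else d.getD l []) := by
  unfold pvStepA
  generalize PySem.Str.strip (pyGetAssocD e "label" "") = lab
  generalize PySem.Str.strip (pyGetAssocD e "text" "") = t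
  by_cases h0 : lab = "" ∨ t = ""
  · rw [if_pos h0, if_neg (by tauto)]
  · have h0' := h0; rw [not_or] at h0'
    rw [if_neg h0]
    by_cases hl : lab = l
    · subst hl
      by_cases hc : d.contains lab
      · by_cases hmem : t ∈ d.getD lab []
        · simp [hc, hmem]
        · simp [hc, hmem, h0', PySem.Dict.getD_insert_self]
      · have hd0 : d.getD lab [] = [] := PySem.Dict.getD_of_not_contains d [] (by simpa using hc)
        simp [hc, hd0, h0', PySem.Dict.getD_insert_self]
    · have hne : l ≠ lab := fun h => hl h.symm
      by_cases hc : d.contains lab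
      · by_cases hmem : t ∈ d.getD lab []
        · simp [hc, hmem, hl]
        · simp [hc, hmem, hl, PySem.Dict.getD_insert_of_ne d _ _ hne]
      · simp [hc, hl, PySem.Dict.getD_insert_self, PySem.Dict.getD_insert_of_ne _ _ _ hne]

-- getD after A's whole entity fold = B's dedup fold, started from the same list
lemma getD_foldA (entities : List (List (String × String)))
    (d : PySem.Dict String (List String)) (l : String) :
    (entities.foldl pvStepA d).getD l [] =
      entities.foldl (fun vs e =>
        let lab := PySem.Str.strip (pyGetAssocD e "label" "")
        let t := PySem.Str.strip (pyGetAssocD e "text" "")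
        if lab ≠ "" ∧ t ≠ "" ∧ lab = l ∧ t ∉ vs then vs ++ [t] else vs) (d.getD l []) := by
  induction entities generalizing d with
  | nil => rfl
  | cons e es ih =>
    simp only [List.foldl_cons]
    rw [ih, getD_pvStepA]

-- the label-initialised dict looks empty at every key
lemma getD_init (labels : List String) (d : PySem.Dict String (List String))
    (h : ∀ l, d.getD l [] = []) (l : String) :
    (labels.foldl (fun d label => d.insert label []) d).getD l [] = [] := by
  induction labels generalizing d with
  | nil => exact h l
  | cons x xs ih =>
    simp only [List.foldl_cons]
    refine ih _ (fun l' => ?_)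
    by_cases hx : l' = x
    · subst hx; exact PySem.Dict.getD_insert_self d _ _ _
    · rw [PySem.Dict.getD_insert_of_ne d _ _ hx]; exact h l'

-- A's grouped dict, read back at any label, is exactly B's values_for
lemma grouped_getD (entities : List (List (String × String))) (labels : List String) (l : String) :
    (entities.foldl pvStepA
        (labels.foldl (fun d label => d.insert label []) PySem.Dict.empty)).getD l [] =
      pvValuesFor entities l := by
  rw [getD_foldA, getD_init labels PySem.Dict.empty (fun l' => rfl) l]
  rfl

-- ===== VERDICT (by name: the statement is the Claim_ definition above) =====
theorem format_entities_with_relations_spec : Claim_equal_format_entities_with_relations := by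
  intro entities labels use_gliner _
  unfold Spec_format_entities_with_relations
  unfold format_entities_with_relations format_entities_with_relations_alt
  by_cases hg : use_gliner = false
  · rw [if_pos hg, if_pos hg]
  · rw [if_neg hg, if_neg hg]
    by_cases he : entities = []
    · rw [if_pos he, if_pos he]
    · rw [if_neg he, if_neg he]
      simp only [List.foldl_map, List.map_map, List.filter_map, grouped_getD, Function.comp_def,
        PySem.List.foldl_append_singleton_eq_map]
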